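-- pv_equiv track=rewrite | github.com/minjunseok6565-pixel/kkk | draft/pool.py | _median_int_half_up
-- ===== SOURCE A (Python) =====
-- import math
-- from typing import Any, Dict, List, Mapping, Optional, Set, Tuple
--
-- def _median_int_half_up(values: List[int]) -> int:
--     """Deterministic median for even-length lists (round half up)."""
--     vs = [int(v) for v in values if v is not None]
--     if not vs:
--         return 9999
--     vs.sort()
--     n = len(vs)
--     mid = n // 2
--     if n % 2 == 1:
--         return int(vs[mid])
--     a = int(vs[mid - 1])
--     b = int(vs[mid])
--     return int(math.floor((a + b) / 2.0 + 0.5))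
-- ===== SOURCE B (Python) =====
-- def _select(vs, k):
--     """k-th smallest (0-based) of non-empty vs, by 3-way quickselect."""
--     while True:
--         p = vs[0]
--         lt = [x for x in vs if x < p]
--         if k < len(lt):
--             vs = lt
--             continue
--         eq = len([x for x in vs if x == p])
--         if k < len(lt) + eq:
--             return p
--         k -= len(lt) + eq
--         vs = [x for x in vs if x > p]
--
--
-- def _median_int_half_up(values):
--     """Deterministic median for even-length lists (round half up)."""
--     vs = [v for v in values if v is not None]
--     n = len(vs)
--     if n == 0:
--         return 9999
--     if n % 2 == 1:
--         return _select(vs, n // 2)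
--     a = _select(vs, n // 2 - 1)
--     b = _select(vs, n // 2)
--     return (a + b + 1) // 2
-- ===== Notes on version B (the rewrite author's own statement) =====
-- stated objective: alternative
-- what changed: B replaces sort-then-index by a 3-way-partition quickselect that extracts only the one or two middle order statistics, and computes the half-up rounding with integer arithmetic (a+b+1)//2 instead of float math; average O(n) but the pure-Python partitioning is not consistently faster than the C-implemented sort.
import Mathlib
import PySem

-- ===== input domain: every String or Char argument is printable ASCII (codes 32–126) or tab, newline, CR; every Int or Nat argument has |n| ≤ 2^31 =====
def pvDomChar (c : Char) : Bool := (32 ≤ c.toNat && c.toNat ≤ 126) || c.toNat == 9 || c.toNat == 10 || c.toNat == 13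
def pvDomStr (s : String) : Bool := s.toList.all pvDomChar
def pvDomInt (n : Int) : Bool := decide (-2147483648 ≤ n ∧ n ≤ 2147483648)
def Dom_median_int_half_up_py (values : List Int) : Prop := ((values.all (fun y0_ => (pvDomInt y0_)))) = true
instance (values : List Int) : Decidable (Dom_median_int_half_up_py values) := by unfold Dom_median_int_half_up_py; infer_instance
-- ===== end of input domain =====

-- B replaces sort-then-index by a 3-way-partition quickselect of the middle order statistic(s), with integer half-up rounding (a+b+1)//2; an alternative algorithm (A's float rounding is ported exactly as (a+b+1)//2, exact on the |n| ≤ 2^31 domain).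


-- ===== PORT A =====
-- '[int(v) for v in values if v is not None]': over List Int every v is a non-None int, so vs = values.
-- 'math.floor((a + b) / 2.0 + 0.5)': no floats in Lean; on the stated domain (|a|,|b| ≤ 2^31) the
-- double computation is exact (all half-integers up to 2^33 are representable), and it equals (a+b+1)//2,
-- which is how it is ported here.
def median_int_half_up_py (values : List Int) : Int :=
  let vs := values
  if vs = [] then 9999
  else
    let vs := PySem.List.sorted vs (fun x => x) false
    let n : Int := vs.length
    let mid : Int := PySem.Int.floordiv n 2
    if PySem.Int.mod n 2 = 1 then
      (PySem.List.pyGet? vs mid).getD 0          -- index always in range here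
    else
      let a := (PySem.List.pyGet? vs (mid - 1)).getD 0
      let b := (PySem.List.pyGet? vs mid).getD 0
      PySem.Int.floordiv (a + b + 1) 2

-- ===== PORT B =====
-- _select vs k: k-th smallest (0-based) of vs by 3-way quickselect (Source B's while-loop as recursion).
def pvSelectB : List Int → Nat → Int
  | [], _ => 0                                    -- unreachable: Source B only calls _select on non-empty vs
  | p :: rest, k =>
    let vs := p :: rest
    let lt := vs.filter (fun x => decide (x < p))
    if k < lt.length then pvSelectB lt k
    else
      let eq := (vs.filter (fun x => decide (x = p))).length
      if k < lt.length + eq then p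
      else pvSelectB (vs.filter (fun x => decide (p < x))) (k - (lt.length + eq))
termination_by vs _ => vs.length
decreasing_by
  · simpa [List.filter] using Nat.lt_succ_of_le (List.length_filter_le _ rest)
  · simpa [List.filter] using Nat.lt_succ_of_le (List.length_filter_le _ rest)

def median_int_half_up_py_alt (values : List Int) : Int :=
  let vs := values
  let n := vs.length
  if n = 0 then 9999
  else if n % 2 = 1 then pvSelectB vs (n / 2)
  else
    let a := pvSelectB vs (n / 2 - 1)
    let b := pvSelectB vs (n / 2)
    PySem.Int.floordiv (a + b + 1) 2

-- ===== PRECONDITION & SPEC =====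
def Spec_median_int_half_up_py (values : List Int) (out : Int) : Prop := out = median_int_half_up_py_alt values
instance (values : List Int) (out : Int) : Decidable (Spec_median_int_half_up_py values out) := by unfold Spec_median_int_half_up_py; infer_instance

-- ===== CLAIM (what is proved, stated in full; the proofs are below) =====
def Claim_equal_median_int_half_up_py : Prop := ∀ (values : List Int), Dom_median_int_half_up_py values → Spec_median_int_half_up_py values (median_int_half_up_py values)

-- ===== LEMMAS AND PROOFS =====

-- count in a filtered list
theorem pv_count_filter (y : Int) (f : Int → Bool) (l : List Int) :
    (l.filter f).count y = if f y then l.count y else 0 := by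
  induction l with
  | nil => simp
  | cons a t ih =>
    by_cases hf : f a <;> by_cases hy : a = y <;>
      simp [List.filter_cons, hf, hy, ih] <;> simp_all

-- Three-way partition at p is a permutation of the list.
theorem pv_partition_perm (vs : List Int) (p : Int) :
    (vs.filter (fun x => decide (x < p)) ++ vs.filter (fun x => decide (x = p)) ++
      vs.filter (fun x => decide (p < x))).Perm vs := by
  rw [List.perm_iff_count]
  intro y
  simp only [List.count_append, pv_count_filter]
  rcases lt_trichotomy y p with h | h | h
  · simp [h, not_lt_of_gt h, ne_of_lt h]
  · simp [h]
  · simp [not_lt_of_gt h, ne_of_gt h, h]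

-- sorted vs = sorted lt ++ eq ++ sorted gt.
theorem pv_sorted_partition (vs : List Int) (p : Int) :
    PySem.List.sorted vs (fun x => x) false =
      PySem.List.sorted (vs.filter (fun x => decide (x < p))) (fun x => x) false ++
      vs.filter (fun x => decide (x = p)) ++
      PySem.List.sorted (vs.filter (fun x => decide (p < x))) (fun x => x) false := by
  apply PySem.List.sorted_id_eq_of_perm_of_pairwise
  · exact (((PySem.List.sorted_perm _ _ _).append (List.Perm.refl _)).append
      (PySem.List.sorted_perm _ _ _)).trans (pv_partition_perm vs p)
  · rw [List.pairwise_append, List.pairwise_append]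
    refine ⟨⟨?_, ?_, ?_⟩, ?_, ?_⟩
    · simpa using PySem.List.sorted_pairwise (vs.filter (fun x => decide (x < p))) (fun x => x)
    · refine List.pairwise_of_forall_mem_list ?_
      intro a ha b hb
      have h1 := (List.mem_filter.mp ha).2
      have h2 := (List.mem_filter.mp hb).2
      simp at h1 h2; omega
    · intro a ha b hb
      have h1 := (List.mem_filter.mp ((PySem.List.mem_sorted _ _ _ _).mp ha)).2
      have h2 := (List.mem_filter.mp hb).2
      simp at h1 h2; omega
    · simpa using PySem.List.sorted_pairwise (vs.filter (fun x => decide (p < x))) (fun x => x)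
    · intro a ha b hb
      have h2 := (List.mem_filter.mp ((PySem.List.mem_sorted _ _ _ _).mp hb)).2
      rcases List.mem_append.mp ha with ha | ha
      · have h1 := (List.mem_filter.mp ((PySem.List.mem_sorted _ _ _ _).mp ha)).2
        simp at h1 h2; omega
      · have h1 := (List.mem_filter.mp ha).2
        simp at h1 h2; omega

-- Quickselect computes the k-th element of the sorted list.
theorem pvSelectB_eq_sorted (n : Nat) : ∀ (vs : List Int) (k : Nat), vs.length ≤ n → k < vs.length →
    pvSelectB vs k = (PySem.List.sorted vs (fun x => x) false).getD k 0 := by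
  induction n with
  | zero => intro vs k h hk; omega
  | succ n ih =>
    intro vs k hlen hk
    match vs with
    | [] => simp at hk
    | p :: rest =>
      have hltlen : ((p :: rest).filter (fun x => decide (x < p))).length ≤ rest.length := by
        simp only [List.filter_cons]
        simp only [lt_irrefl, decide_false]
        simpa using List.length_filter_le _ rest
      have hgtlen : ((p :: rest).filter (fun x => decide (p < x))).length ≤ rest.length := by
        simp only [List.filter_cons]
        simp only [lt_irrefl, decide_false]
        simpa using List.length_filter_le _ rest
      have hsum : ((p :: rest).filter (fun x => decide (x < p))).length +
          ((p :: rest).filter (fun x => decide (x = p))).length +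
          ((p :: rest).filter (fun x => decide (p < x))).length = (p :: rest).length := by
        have := (pv_partition_perm (p :: rest) p).length_eq
        simp only [List.length_append] at this
        omega
      rw [pv_sorted_partition (p :: rest) p]
      rw [pvSelectB]
      simp only []
      set lt := (p :: rest).filter (fun x => decide (x < p)) with hlt
      set eqs := (p :: rest).filter (fun x => decide (x = p)) with heqs
      set gt := (p :: rest).filter (fun x => decide (p < x)) with hgt
      by_cases h1 : k < lt.length
      · rw [if_pos h1]
        rw [List.getD_append _ _ _ _ (by rw [List.length_append, PySem.List.length_sorted]; omega)]
        rw [List.getD_append _ _ _ _ (by rw [PySem.List.length_sorted]; omega)]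
        exact ih lt k (by simp at hlen; omega) h1
      · rw [if_neg h1]
        by_cases h2 : k < lt.length + eqs.length
        · rw [if_pos h2]
          rw [List.getD_append _ _ _ _ (by rw [List.length_append, PySem.List.length_sorted]; omega)]
          rw [List.getD_append_right _ _ _ _ (by rw [PySem.List.length_sorted]; omega)]
          have hidx : k - (PySem.List.sorted lt (fun x => x) false).length < eqs.length := by
            rw [PySem.List.length_sorted]; omega
          rw [List.getD_eq_getElem _ _ hidx]
          have hmem : eqs[k - (PySem.List.sorted lt (fun x => x) false).length] ∈ eqs :=
            List.getElem_mem hidx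
          have := (List.mem_filter.mp hmem).2
          symm; simpa using this
        · rw [if_neg h2]
          have hk' : k - (lt.length + eqs.length) < gt.length := by
            simp only [List.length_cons] at hsum hk; omega
          rw [List.getD_append_right _ _ _ _ (by simp only [List.length_append, PySem.List.length_sorted]; omega)]
          simp only [List.length_append, PySem.List.length_sorted]
          exact ih gt (k - (lt.length + eqs.length)) (by simp at hlen; omega) hk'

theorem median_int_half_up_py_spec : Claim_equal_median_int_half_up_py := by
  intro values _hdom
  unfold Spec_median_int_half_up_py median_int_half_up_py median_int_half_up_py_alt
  cases values with
  | nil => simp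
  | cons v vs =>
    simp only []
    rw [if_neg (by simp : ¬ (v :: vs) = []), if_neg (by simp : ¬ (v :: vs).length = 0)]
    set L := v :: vs with hL
    set S := PySem.List.sorted L (fun x => x) false with hS
    have hlenS : S.length = L.length := PySem.List.length_sorted _ _ _
    have hlpos : 0 < L.length := by simp [hL]
    have hmid : PySem.Int.floordiv ((S.length : Int)) 2 = ((L.length / 2 : Nat) : Int) := by
      rw [hlenS]; exact_mod_cast PySem.Int.floordiv_natCast L.length 2
    have hmod : PySem.Int.mod ((S.length : Int)) 2 = ((L.length % 2 : Nat) : Int) := by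
      rw [hlenS]; exact_mod_cast PySem.Int.mod_natCast L.length 2
    rw [hmid, hmod]
    by_cases hodd : L.length % 2 = 1
    · rw [if_pos (by exact_mod_cast hodd), if_pos hodd]
      rw [PySem.List.pyGet?_natCast]
      rw [pvSelectB_eq_sorted L.length L (L.length / 2) le_rfl (by omega)]
      rw [List.getD_eq_getElem?_getD]
    · rw [if_neg (by exact_mod_cast hodd), if_neg hodd]
      have h2 : 1 ≤ L.length / 2 := by omega
      have hcast : ((L.length / 2 : Nat) : Int) - 1 = ((L.length / 2 - 1 : Nat) : Int) := by omega
      rw [hcast, PySem.List.pyGet?_natCast, PySem.List.pyGet?_natCast]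
      rw [pvSelectB_eq_sorted L.length L (L.length / 2 - 1) le_rfl (by omega),
          pvSelectB_eq_sorted L.length L (L.length / 2) le_rfl (by omega)]
      rw [List.getD_eq_getElem?_getD, List.getD_eq_getElem?_getD]
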